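-- pv_equiv track=rewrite | github.com/q6/python-snippets | pass_gen.py | take_out_exclude_characters
-- ===== SOURCE A (Python) =====
-- def take_out_exclude_characters(password_set, exclude_characters):
--     # take out the chars the user wants to exclude
--     new_set = ''
--     for c in password_set:
--         if c in exclude_characters:
--             pass
--         else:
--             new_set += c
--     return new_set
-- ===== SOURCE B (Python) =====
-- def take_out_exclude_characters(password_set, exclude_characters):
--     # staged passes: one whole-string replace per excluded character,
--     # never testing membership of password characters
--     result = password_set
--     for x in exclude_characters:
--         result = result.replace(x, '')
--     return result
-- ===== Notes on version B (the rewrite author's own statement) =====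
-- stated objective: alternative
-- what changed: B loops over exclude_characters, deleting all occurrences of each via one whole-string replace pass, instead of A's single pass over password_set with a per-character membership test and string concatenation.
import Mathlib
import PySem

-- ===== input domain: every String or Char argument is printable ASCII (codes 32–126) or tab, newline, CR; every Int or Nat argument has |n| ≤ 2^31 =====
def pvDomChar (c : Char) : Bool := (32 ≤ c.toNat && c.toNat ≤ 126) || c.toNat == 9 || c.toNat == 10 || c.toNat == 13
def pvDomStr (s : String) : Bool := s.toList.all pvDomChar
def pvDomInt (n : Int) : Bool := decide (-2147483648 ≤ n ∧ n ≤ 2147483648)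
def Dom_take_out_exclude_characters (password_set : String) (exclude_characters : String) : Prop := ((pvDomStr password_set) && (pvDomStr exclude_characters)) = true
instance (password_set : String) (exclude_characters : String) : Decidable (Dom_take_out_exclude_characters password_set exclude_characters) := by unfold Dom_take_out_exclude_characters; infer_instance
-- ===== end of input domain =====

-- B iterates over exclude_characters doing one whole-string replace pass per excluded char,
-- instead of A's single pass over password_set with a membership test (alternative decomposition).

-- ===== PORT A =====
-- for c in password_set: if c in exclude_characters: pass else: new_set += c
def take_out_exclude_characters (password_set : String) (exclude_characters : String) : String :=
  password_set.toList.foldl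
    (fun new_set c => if exclude_characters.toList.contains c then new_set else new_set.push c)
    ""

-- ===== PORT B =====
-- result = password_set; for x in exclude_characters: result = result.replace(x, ''); return result
def take_out_exclude_characters_alt (password_set : String) (exclude_characters : String) : String :=
  exclude_characters.toList.foldl
    (fun result x => PySem.Str.replace result (String.singleton x) "")
    password_set

-- ===== PRECONDITION & SPEC =====
def Spec_take_out_exclude_characters (password_set : String) (exclude_characters : String) (out : String) : Prop := out = take_out_exclude_characters_alt password_set exclude_characters
instance (password_set : String) (exclude_characters : String) (out : String) : Decidable (Spec_take_out_exclude_characters password_set exclude_characters out) := by unfold Spec_take_out_exclude_characters; infer_instance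

-- ===== CLAIM (what is proved, stated in full; the proofs are below) =====
def Claim_equal_take_out_exclude_characters : Prop := ∀ (password_set : String) (exclude_characters : String), Dom_take_out_exclude_characters password_set exclude_characters → Spec_take_out_exclude_characters password_set exclude_characters (take_out_exclude_characters password_set exclude_characters)

-- ===== LEMMAS AND PROOFS =====

-- PySem.Chars.replace.go for a one-char pattern and empty replacement is filtering out that char.
theorem pv_replace_go_filter (x : Char) :
    ∀ (s acc : List Char) (fuel : ℕ), s.length ≤ fuel →
      PySem.Chars.replace.go [x] [] fuel s acc = acc.reverse ++ s.filter (· != x) := by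
  intro s
  induction s with
  | nil =>
    intro acc fuel _
    cases fuel <;> simp [PySem.Chars.replace.go]
  | cons c t ih =>
    intro acc fuel hle
    cases fuel with
    | zero => simp at hle
    | succ n =>
      by_cases h : x = c
      · subst h
        rw [show PySem.Chars.replace.go [x] [] (n+1) (x :: t) acc
              = PySem.Chars.replace.go [x] [] n t acc from by
            simp [PySem.Chars.replace.go, List.isPrefixOf]]
        rw [ih acc n (by simpa using hle)]
        simp [List.filter_cons]
      · rw [show PySem.Chars.replace.go [x] [] (n+1) (c :: t) acc
              = PySem.Chars.replace.go [x] [] n t (c :: acc) from by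
            simp [PySem.Chars.replace.go, List.isPrefixOf, h]]
        rw [ih (c :: acc) n (by simpa using hle)]
        simp [List.filter_cons, Ne.symm h, bne_iff_ne]

-- Deleting one character via replace = filtering it out.
theorem pv_replace_single (x : Char) (s : List Char) :
    PySem.Chars.replace s [x] [] = s.filter (· != x) := by
  rw [PySem.Chars.replace]
  simpa using pv_replace_go_filter x s [] s.length le_rfl

-- B's staged replace loop = one filter by non-membership.
theorem pv_foldl_replace (es : List Char) (s : String) :
    es.foldl (fun r x => PySem.Str.replace r (String.singleton x) "") s
      = String.ofList (s.toList.filter fun c => !es.contains c) := by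
  induction es generalizing s with
  | nil => simp [String.ofList]
  | cons x es ih =>
    rw [List.foldl_cons, ih]
    apply String.ext
    simp only [PySem.Str.toList_replace, String.toList_singleton]
    rw [show ("" : String).toList = [] from rfl, pv_replace_single]
    simp only [String.toList_ofList, List.filter_filter]
    apply List.filter_congr
    intro c _
    cases h : (c == x) <;> simp_all

-- A's accumulator loop = appending the filtered characters.
theorem pv_foldl_push_filter (q : Char → Bool) (cs : List Char) (acc : String) :
    cs.foldl (fun a c => if q c then a else a.push c) acc
      = acc ++ String.ofList (cs.filter fun c => !q c) := by
  induction cs generalizing acc with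
  | nil => simp
  | cons c cs ih =>
    by_cases h : q c
    · simp [List.foldl_cons, h, ih]
    · rw [List.foldl_cons, if_neg h, ih]
      apply String.ext
      simp [h]

-- ===== VERDICT (by name: the statement is the Claim_ definition above) =====
theorem take_out_exclude_characters_spec : Claim_equal_take_out_exclude_characters := by
  intro p e _
  unfold Spec_take_out_exclude_characters take_out_exclude_characters take_out_exclude_characters_alt
  rw [pv_foldl_push_filter, pv_foldl_replace]
  simp
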